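-- pv_equiv track=rewrite | github.com/sanjanabalakrishna/Python-Scripts | CaesarCipherEncryption.py | AlphabetKey
-- ===== SOURCE A (Python) =====
-- def AlphabetKey(x):
--     if x > 25:
--         while x > 25:
--             y = x - 25
--             x = y
--         return(y)
--     else:
--         return(x)
-- ===== SOURCE B (Python) =====
-- def AlphabetKey(x):
--     if x > 25:
--         return (x - 26) % 25 + 1
--     else:
--         return x
-- ===== Notes on version B (the rewrite author's own statement) =====
-- stated objective: faster
-- what changed: Replaced the repeated-subtraction while-loop with a closed-form modular reduction (x-26)%25+1 for x>25.
import Mathlib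
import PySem

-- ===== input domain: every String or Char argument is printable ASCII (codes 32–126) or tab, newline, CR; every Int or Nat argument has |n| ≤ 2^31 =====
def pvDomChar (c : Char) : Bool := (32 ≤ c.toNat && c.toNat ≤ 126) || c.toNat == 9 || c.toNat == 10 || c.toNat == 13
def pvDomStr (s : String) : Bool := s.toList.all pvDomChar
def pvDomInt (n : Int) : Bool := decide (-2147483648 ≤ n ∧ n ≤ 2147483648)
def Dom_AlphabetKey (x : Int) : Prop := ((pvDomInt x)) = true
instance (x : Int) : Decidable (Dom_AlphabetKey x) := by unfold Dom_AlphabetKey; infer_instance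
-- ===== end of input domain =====

-- B replaces A's repeated-subtraction loop by a closed-form modular reduction (faster).
-- ===== PORT A =====
-- while x > 25: y = x - 25; x = y  — ported as structural recursion on x.toNat
def AlphabetKeyLoop (x : Int) : Int :=
  if x > 25 then AlphabetKeyLoop (x - 25) else x
termination_by x.toNat
decreasing_by omega

def AlphabetKey (x : Int) : Int :=
  if x > 25 then AlphabetKeyLoop (x - 25) else x

-- ===== PORT B =====
def AlphabetKey_alt (x : Int) : Int :=
  if x > 25 then PySem.Int.mod (x - 26) 25 + 1 else x

-- ===== PRECONDITION & SPEC =====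
def Spec_AlphabetKey (x : Int) (out : Int) : Prop := out = AlphabetKey_alt x
instance (x : Int) (out : Int) : Decidable (Spec_AlphabetKey x out) := by unfold Spec_AlphabetKey; infer_instance

-- ===== CLAIM (what is proved, stated in full; the proofs are below) =====
def Claim_equal_AlphabetKey : Prop := ∀ (x : Int), Dom_AlphabetKey x → Spec_AlphabetKey x (AlphabetKey x)

-- ===== LEMMAS AND PROOFS =====

-- ===== VERDICT (by name: the statement is the Claim_ definition above) =====
-- loop characterisation: for x ≥ 1 the loop returns (x-1) % 25 + 1
theorem AlphabetKeyLoop_eq (x : Int) (hx : 1 ≤ x) :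
    AlphabetKeyLoop x = (x - 1) % 25 + 1 := by
  by_cases h : x > 25
  · have ih := AlphabetKeyLoop_eq (x - 25) (by omega)
    rw [AlphabetKeyLoop, if_pos h, ih]
    have : x - 25 - 1 = x - 1 - 25 := by ring
    rw [this, Int.sub_emod_right]
  · rw [AlphabetKeyLoop, if_neg h]
    have : (x - 1) % 25 = x - 1 := Int.emod_eq_of_lt (by omega) (by omega)
    omega
termination_by x.toNat
decreasing_by omega

theorem AlphabetKey_spec : Claim_equal_AlphabetKey := by
  intro x _
  unfold Spec_AlphabetKey AlphabetKey AlphabetKey_alt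
  by_cases h : x > 25
  · rw [if_pos h, if_pos h, AlphabetKeyLoop_eq (x - 25) (by omega),
      PySem.Int.mod_eq_emod_of_pos (by norm_num)]
    congr 1
    ring_nf
  · rw [if_neg h, if_neg h]
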